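-- pv_equiv track=rewrite | github.com/ABakker30/ballpuzzle | core/presenter.py | render_print_layout
-- ===== SOURCE A (Python) =====
-- from typing import Dict, List, Tuple, Set
--
-- Cell = Tuple[int,int,int]
--
-- def render_print_layout(piece_cells: Dict[str, List[Cell]], mode: str, square_axis: str=None) -> str:
--     """
--     Build a simple grid text from lattice coords using integer in-plane basis.
--     - square i=const → grid (j,k), j=const → (i,k), k=const → (i,j)
--     - triangular t=const → grid (u=i-j, v=i-k)
--     """
--     # Build index maps
--     mp = {}  # (u,v) -> letter
--     if mode == "square":
--         axis = square_axis or "i"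
--         for letter, lst in piece_cells.items():
--             for (i,j,k) in lst:
--                 if axis == "i": u,v = j,k
--                 elif axis == "j": u,v = i,k
--                 else: u,v = i,j
--                 mp[(u,v)] = letter
--     else:
--         for letter, lst in piece_cells.items():
--             for (i,j,k) in lst:
--                 u = i - j
--                 v = i - k
--                 mp[(u,v)] = letter
--
--     if not mp:
--         return "[empty layout]"
--
--     us = [uv[0] for uv in mp.keys()]
--     vs = [uv[1] for uv in mp.keys()]
--     umin, umax = min(us), max(us)
--     vmin, vmax = min(vs), max(vs)
--
--     lines = []
--     header = "[SOLUTION — {} view]\n".format("square" if mode=="square" else "triangular")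
--     lines.append(header)
--     lines.append("Legend: rows=v ({}..{}), cols=u ({}..{})\n".format(vmin, vmax, umin, umax))
--     for v in range(vmin, vmax+1):
--         row = []
--         for u in range(umin, umax+1):
--             row.append(mp.get((u,v), "."))
--         lines.append(" ".join(row))
--     return "\n".join(lines)
-- ===== SOURCE B (Python) =====
-- def render_print_layout(piece_cells, mode, square_axis=None):
--     # Sweep approach: project cells to a flat list, dedup with last-write-wins,
--     # sort by (v,u) and emit each row by run-filling the '.' gaps between cells
--     # (no dict probe per grid position).
--     cells = []
--     if mode == "square":
--         axis = square_axis or "i"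
--         for letter, lst in piece_cells.items():
--             for (i, j, k) in lst:
--                 if axis == "i":
--                     uv = (j, k)
--                 elif axis == "j":
--                     uv = (i, k)
--                 else:
--                     uv = (i, j)
--                 cells.append((uv, letter))
--     else:
--         for letter, lst in piece_cells.items():
--             for (i, j, k) in lst:
--                 cells.append(((i - j, i - k), letter))
--
--     if not cells:
--         return "[empty layout]"
--
--     seen = set()
--     pts = []
--     for (u, v), letter in reversed(cells):
--         if (u, v) not in seen:
--             seen.add((u, v))
--             pts.append((v, u, letter))
--     pts.sort(key=lambda p: (p[0], p[1]))
--
--     umin = min(p[1] for p in pts)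
--     umax = max(p[1] for p in pts)
--     vmin = pts[0][0]
--     vmax = pts[-1][0]
--
--     lines = ["[SOLUTION — {} view]\n".format("square" if mode == "square" else "triangular"),
--              "Legend: rows=v ({}..{}), cols=u ({}..{})\n".format(vmin, vmax, umin, umax)]
--     idx = 0
--     for v in range(vmin, vmax + 1):
--         chars = []
--         cur = umin
--         while idx < len(pts) and pts[idx][0] == v:
--             _, u, letter = pts[idx]
--             idx += 1
--             chars.extend(["."] * (u - cur))
--             chars.append(letter)
--             cur = u + 1
--         chars.extend(["."] * (umax + 1 - cur))
--         lines.append(" ".join(chars))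
--     return "\n".join(lines)
-- ===== Notes on version B (the rewrite author's own statement) =====
-- stated objective: alternative
-- what changed: Replaces A's dict-then-gather rendering (build a (u,v)->letter dict, then probe mp.get at every bounding-box position) by a dedup-sort-sweep: project cells to a flat list, keep the last write per (u,v) via a reversed scan with a seen-set, sort the surviving points by (v,u) and emit each row in one sweep, run-filling the '.' gaps between consecutive points instead of probing every grid cell.
import Mathlib
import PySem

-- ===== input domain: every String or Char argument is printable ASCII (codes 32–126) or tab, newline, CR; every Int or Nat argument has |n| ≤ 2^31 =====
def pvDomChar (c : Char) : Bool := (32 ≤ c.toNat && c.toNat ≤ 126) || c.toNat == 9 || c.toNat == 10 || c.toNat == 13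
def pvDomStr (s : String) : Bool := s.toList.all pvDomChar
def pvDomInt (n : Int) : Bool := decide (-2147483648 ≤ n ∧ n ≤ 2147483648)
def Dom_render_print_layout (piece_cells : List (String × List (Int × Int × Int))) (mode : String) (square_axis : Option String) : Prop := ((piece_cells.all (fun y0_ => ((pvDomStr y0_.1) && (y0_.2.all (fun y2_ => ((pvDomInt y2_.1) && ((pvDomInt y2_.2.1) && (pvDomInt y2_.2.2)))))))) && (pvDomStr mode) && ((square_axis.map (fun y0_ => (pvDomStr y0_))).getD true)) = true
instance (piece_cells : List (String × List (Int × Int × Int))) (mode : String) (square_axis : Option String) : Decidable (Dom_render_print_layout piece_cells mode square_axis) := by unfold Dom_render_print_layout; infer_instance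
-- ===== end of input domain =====

-- B replaces A's dict-then-gather rendering (probe the dict at every bounding-box position)
-- by a dedup-sort-sweep: keep the last write per (u,v), sort by (v,u), and emit each row by
-- run-filling the '.' gaps between consecutive points.

-- ===== PORT A =====
-- shared projection helpers (the in-plane (u,v) of one lattice cell, as in both Pythons)
def pvAxisOf (square_axis : Option String) : String :=
  -- Python `square_axis or "i"`: None and "" are falsy
  match square_axis with
  | none => "i"
  | some s => if s = "" then "i" else s

def pvProjSquare (axis : String) (c : Int × Int × Int) : Int × Int :=
  if axis = "i" then (c.2.1, c.2.2)
  else if axis = "j" then (c.1, c.2.2)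
  else (c.1, c.2.1)

def pvProjTri (c : Int × Int × Int) : Int × Int :=
  (c.1 - c.2.1, c.1 - c.2.2)

-- A: build the (u,v) -> letter dict by the two nested loops
def pvBuildMap (piece_cells : List (String × List (Int × Int × Int))) (mode : String) (square_axis : Option String) : PySem.Dict (Int × Int) String :=
  if mode = "square" then
    piece_cells.foldl (fun mp p =>
      p.2.foldl (fun mp c => mp.insert (pvProjSquare (pvAxisOf square_axis) c) p.1) mp) PySem.Dict.empty
  else
    piece_cells.foldl (fun mp p =>
      p.2.foldl (fun mp c => mp.insert (pvProjTri c) p.1) mp) PySem.Dict.empty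

-- A: gather pass — probe mp.get((u,v), ".") for every grid position
def pvRenderGather (mp : PySem.Dict (Int × Int) String) (view : String) : String :=
  if mp.items.isEmpty then "[empty layout]"
  else
    let us := mp.keys.map (fun uv => uv.1)
    let vs := mp.keys.map (fun uv => uv.2)
    -- the guard makes the key lists nonempty, so Python's min/max never raise; getD 0 is unreachable
    let umin := (PySem.List.min? us (fun x => x)).getD 0
    let umax := (PySem.List.max? us (fun x => x)).getD 0
    let vmin := (PySem.List.min? vs (fun x => x)).getD 0
    let vmax := (PySem.List.max? vs (fun x => x)).getD 0
    let header := "[SOLUTION — " ++ view ++ " view]\n"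
    let legend := "Legend: rows=v (" ++ PySem.Int.toStr vmin ++ ".." ++ PySem.Int.toStr vmax ++ "), cols=u (" ++ PySem.Int.toStr umin ++ ".." ++ PySem.Int.toStr umax ++ ")\n"
    let lines := (PySem.List.pyRange vmin (vmax + 1) 1).foldl (fun lines v =>
        lines ++ [PySem.Str.join " " ((PySem.List.pyRange umin (umax + 1) 1).foldl
          (fun row u => row ++ [mp.getD (u, v) "."]) [])]) [header, legend]
    PySem.Str.join "\n" lines

def render_print_layout (piece_cells : List (String × List (Int × Int × Int))) (mode : String) (square_axis : Option String) : String :=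
  pvRenderGather (pvBuildMap piece_cells mode square_axis)
    (if mode = "square" then "square" else "triangular")

-- ===== PORT B =====
-- B: project every cell once into a flat ((u,v), letter) list (same iteration order)
def pvBuildCells (piece_cells : List (String × List (Int × Int × Int))) (mode : String) (square_axis : Option String) : List ((Int × Int) × String) :=
  if mode = "square" then
    piece_cells.foldl (fun acc p =>
      p.2.foldl (fun acc c => acc ++ [(pvProjSquare (pvAxisOf square_axis) c, p.1)]) acc) []
  else
    piece_cells.foldl (fun acc p =>
      p.2.foldl (fun acc c => acc ++ [(pvProjTri c, p.1)]) acc) []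

-- B: last-write-wins dedup — scan the cells in reverse, keep the first hit per (u,v), store (v,u,letter)
def pvDedupStep (st : PySem.Set (Int × Int) × List (Int × Int × String)) (q : (Int × Int) × String) : PySem.Set (Int × Int) × List (Int × Int × String) :=
  if q.1 ∈ st.1 then st else (st.1.add q.1, st.2 ++ [(q.1.2, q.1.1, q.2)])

-- B: one inner step of a row sweep — run-fill '.' up to the point's column, then place its letter
def pvRowStep (cc : List String × Int) (p : Int × Int × String) : List String × Int :=
  (cc.1 ++ List.replicate (p.2.1 - cc.2).toNat "." ++ [p.2.2], p.2.1 + 1)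

-- B: one row of the sweep — consume the sorted prefix with this v (the Python while loop), pad the tail
def pvSweepStep (umin umax : Int) (st : List (Int × Int × String) × List String) (v : Int) : List (Int × Int × String) × List String :=
  let sp := st.1.span (fun p => p.1 == v)
  let r := sp.1.foldl pvRowStep ([], umin)
  (sp.2, st.2 ++ [PySem.Str.join " " (r.1 ++ List.replicate (umax + 1 - r.2).toNat ".")])

def pvRenderSweep (cells : List ((Int × Int) × String)) (view : String) : String :=
  if cells.isEmpty then "[empty layout]"
  else
    let pts := PySem.List.sorted2 (cells.reverse.foldl pvDedupStep (PySem.Set.empty, [])).2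
      (fun p => p.1) (fun p => p.2.1)
    let umin := (PySem.List.min? (pts.map (fun p => p.2.1)) (fun x => x)).getD 0
    let umax := (PySem.List.max? (pts.map (fun p => p.2.1)) (fun x => x)).getD 0
    -- the guard makes pts nonempty, so Python's min/pts[0]/pts[-1] never raise; getD 0 is unreachable
    let vmin := ((PySem.List.pyGet? pts 0).map (fun p => p.1)).getD 0
    let vmax := ((PySem.List.pyGet? pts (-1)).map (fun p => p.1)).getD 0
    let header := "[SOLUTION — " ++ view ++ " view]\n"
    let legend := "Legend: rows=v (" ++ PySem.Int.toStr vmin ++ ".." ++ PySem.Int.toStr vmax ++ "), cols=u (" ++ PySem.Int.toStr umin ++ ".." ++ PySem.Int.toStr umax ++ ")\n"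
    PySem.Str.join "\n"
      ((PySem.List.pyRange vmin (vmax + 1) 1).foldl (pvSweepStep umin umax) (pts, [header, legend])).2

def render_print_layout_alt (piece_cells : List (String × List (Int × Int × Int))) (mode : String) (square_axis : Option String) : String :=
  pvRenderSweep (pvBuildCells piece_cells mode square_axis)
    (if mode = "square" then "square" else "triangular")

-- ===== PRECONDITION & SPEC =====
def Spec_render_print_layout (piece_cells : List (String × List (Int × Int × Int))) (mode : String) (square_axis : Option String) (out : String) : Prop := out = render_print_layout_alt piece_cells mode square_axis
instance (piece_cells : List (String × List (Int × Int × Int))) (mode : String) (square_axis : Option String) (out : String) : Decidable (Spec_render_print_layout piece_cells mode square_axis out) := by unfold Spec_render_print_layout; infer_instance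

-- ===== CLAIM (what is proved, stated in full; the proofs are below) =====
def Claim_equal_render_print_layout : Prop := ∀ (piece_cells : List (String × List (Int × Int × Int))) (mode : String) (square_axis : Option String), Dom_render_print_layout piece_cells mode square_axis → Spec_render_print_layout piece_cells mode square_axis (render_print_layout piece_cells mode square_axis)

-- ===== LEMMAS AND PROOFS =====

-- ------- shared glue: both builds traverse the same flat projected cell list -------
def pvCellsList (g : (Int × Int × Int) → Int × Int) (pcs : List (String × List (Int × Int × Int))) : List ((Int × Int) × String) :=
  pcs.flatMap (fun p => p.2.map (fun c => (g c, p.1)))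

def pvStepD (d : PySem.Dict (Int × Int) String) (q : (Int × Int) × String) : PySem.Dict (Int × Int) String :=
  d.insert q.1 q.2

lemma pv_dict_inner (g : (Int × Int × Int) → Int × Int) (letter : String) (lst : List (Int × Int × Int)) :
    ∀ (d : PySem.Dict (Int × Int) String),
      lst.foldl (fun mp c => mp.insert (g c) letter) d
        = (lst.map (fun c => (g c, letter))).foldl pvStepD d := by
  induction lst with
  | nil => intro d; rfl
  | cons c t ih => intro d; simp only [List.foldl_cons, List.map_cons]; exact ih _

lemma pv_dict_eq (g : (Int × Int × Int) → Int × Int) (pcs : List (String × List (Int × Int × Int))) :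
    ∀ (d : PySem.Dict (Int × Int) String),
      pcs.foldl (fun mp p => p.2.foldl (fun mp c => mp.insert (g c) p.1) mp) d
        = (pvCellsList g pcs).foldl pvStepD d := by
  induction pcs with
  | nil => intro d; rfl
  | cons p t ih =>
    intro d
    simp only [List.foldl_cons, pvCellsList, List.flatMap_cons, List.foldl_append]
    rw [pv_dict_inner, ih]
    rfl

lemma pv_cells_eq (g : (Int × Int × Int) → Int × Int) (pcs : List (String × List (Int × Int × Int))) :
    ∀ (acc : List ((Int × Int) × String)),
      pcs.foldl (fun acc p => p.2.foldl (fun acc c => acc ++ [(g c, p.1)]) acc) acc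
        = acc ++ pvCellsList g pcs := by
  induction pcs with
  | nil => intro acc; simp [pvCellsList]
  | cons p t ih =>
    intro acc
    simp only [List.foldl_cons, pvCellsList, List.flatMap_cons]
    rw [PySem.List.foldl_append_singleton_eq_map, ih, List.append_assoc]
    rfl

lemma pv_buildMap_eq (pcs : List (String × List (Int × Int × Int))) (mode : String) (sq : Option String) :
    pvBuildMap pcs mode sq = (pvBuildCells pcs mode sq).foldl pvStepD PySem.Dict.empty := by
  unfold pvBuildMap pvBuildCells
  split_ifs
  · rw [pv_dict_eq, pv_cells_eq, List.nil_append]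
  · rw [pv_dict_eq, pv_cells_eq, List.nil_append]

-- ------- A's dict characterised: last-write-wins lookup in the flat list -------
def pvLast (cells : List ((Int × Int) × String)) (k : Int × Int) : Option String :=
  (cells.reverse.find? (fun q => q.1 == k)).map (fun q => q.2)

lemma pv_getD_fold (cells : List ((Int × Int) × String)) :
    ∀ (d : PySem.Dict (Int × Int) String) (k : Int × Int) (dflt : String),
      (cells.foldl pvStepD d).getD k dflt = (pvLast cells k).getD (d.getD k dflt) := by
  induction cells with
  | nil => intro d k dflt; rfl
  | cons q t ih =>
    intro d k dflt
    simp only [List.foldl_cons]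
    rw [show pvStepD d q = d.insert q.1 q.2 from rfl, ih]
    unfold pvLast
    rw [List.reverse_cons, List.find?_append]
    cases h : t.reverse.find? (fun q' => q'.1 == k) with
    | some r => simp
    | none =>
      simp only [Option.none_or, List.find?_singleton, Option.map_none, Option.getD_none]
      rw [PySem.Dict.getD_insert]
      by_cases hk : q.1 = k
      · simp [hk]
      · simp [hk, Ne.symm hk]

lemma pv_mem_keys (l : List ((Int × Int) × String)) :
    ∀ (d : PySem.Dict (Int × Int) String) (k : Int × Int),
      k ∈ (l.foldl pvStepD d).keys ↔ k ∈ d.keys ∨ k ∈ l.map (fun q => q.1) := by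
  induction l with
  | nil => simp
  | cons q t ih =>
    intro d k
    simp only [List.foldl_cons, List.map_cons, List.mem_cons]
    rw [ih]
    simp only [pvStepD, PySem.Dict.mem_keys_insert]
    tauto

lemma pv_contains_mono (l : List ((Int × Int) × String)) :
    ∀ (d : PySem.Dict (Int × Int) String) (k : Int × Int),
      d.contains k = true → (l.foldl pvStepD d).contains k = true := by
  induction l with
  | nil => intro d k h; exact h
  | cons q t ih =>
    intro d k h
    refine ih _ _ ?_
    simp [pvStepD, PySem.Dict.contains_insert, h]

lemma pv_items_ne_nil (q : (Int × Int) × String) (rest : List ((Int × Int) × String)) :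
    ((q :: rest).foldl pvStepD PySem.Dict.empty).items ≠ [] := by
  intro h
  have hc : ((q :: rest).foldl pvStepD PySem.Dict.empty).contains q.1 = true := by
    simp only [List.foldl_cons]
    exact pv_contains_mono rest _ _ (by simp [pvStepD, PySem.Dict.contains_insert_self])
  have hfalse : ∀ (d : PySem.Dict (Int × Int) String), d.items = [] → d.contains q.1 = false := by
    intro d hd; cases d with
    | mk items => simp at hd; subst hd; simp [PySem.Dict.contains_mk]
  rw [hfalse _ h] at hc
  exact Bool.false_ne_true hc

-- ------- B's dedup characterised -------
def pvKeyOf (p : Int × Int × String) : Int × Int := (p.2.1, p.1)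

def pvDedupNew : List ((Int × Int) × String) → List (Int × Int) → List (Int × Int × String)
  | [], _ => []
  | q :: t, seen =>
      if q.1 ∈ seen then pvDedupNew t seen
      else (q.1.2, q.1.1, q.2) :: pvDedupNew t (seen ++ [q.1])

lemma pv_dedup_fold (l : List ((Int × Int) × String)) :
    ∀ (seen : PySem.Set (Int × Int)) (acc : List (Int × Int × String)),
      (l.foldl pvDedupStep (seen, acc)).2 = acc ++ pvDedupNew l seen := by
  induction l with
  | nil => intro seen acc; simp [pvDedupNew]
  | cons q t ih =>
    intro seen acc
    simp only [List.foldl_cons, pvDedupNew]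
    by_cases h : q.1 ∈ seen
    · rw [if_pos h, show pvDedupStep (seen, acc) q = (seen, acc) from by simp [pvDedupStep, h]]
      exact ih seen acc
    · rw [if_neg h, show pvDedupStep (seen, acc) q
          = (seen ++ [q.1], acc ++ [(q.1.2, q.1.1, q.2)]) from by
        simp [pvDedupStep, h, PySem.Set.add]]
      rw [ih]
      simp

lemma pv_dedupNew_mem_key (l : List ((Int × Int) × String)) :
    ∀ (seen : List (Int × Int)) (k : Int × Int),
      k ∈ (pvDedupNew l seen).map pvKeyOf ↔ (k ∈ l.map (fun q => q.1) ∧ k ∉ seen) := by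
  induction l with
  | nil => intro seen k; simp [pvDedupNew]
  | cons q t ih =>
    intro seen k
    simp only [pvDedupNew, List.map_cons, List.mem_cons]
    by_cases h : q.1 ∈ seen
    · rw [if_pos h, ih]
      constructor
      · rintro ⟨hm, hn⟩; exact ⟨Or.inr hm, hn⟩
      · rintro ⟨hm | hm, hn⟩
        · subst hm; exact absurd h hn
        · exact ⟨hm, hn⟩
    · rw [if_neg h]
      simp only [List.map_cons, List.mem_cons, ih, List.mem_append]
      have hk : pvKeyOf (q.1.2, q.1.1, q.2) = q.1 := rfl
      rw [hk]
      constructor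
      · rintro (rfl | ⟨hm, hn⟩)
        · exact ⟨Or.inl rfl, h⟩
        · exact ⟨Or.inr hm, fun hx => hn (Or.inl hx)⟩
      · rintro ⟨hm | hm, hn⟩
        · exact Or.inl hm
        · by_cases hq : k = q.1
          · exact Or.inl hq
          · exact Or.inr ⟨hm, by tauto⟩

lemma pv_dedupNew_nodup (l : List ((Int × Int) × String)) :
    ∀ (seen : List (Int × Int)), ((pvDedupNew l seen).map pvKeyOf).Nodup := by
  induction l with
  | nil => intro seen; simp [pvDedupNew]
  | cons q t ih =>
    intro seen
    simp only [pvDedupNew]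
    by_cases h : q.1 ∈ seen
    · rw [if_pos h]; exact ih seen
    · rw [if_neg h]
      simp only [List.map_cons, List.nodup_cons]
      refine ⟨?_, ih _⟩
      rw [show pvKeyOf (q.1.2, q.1.1, q.2) = q.1 from rfl, pv_dedupNew_mem_key]
      simp

lemma pv_dedupNew_find (l : List ((Int × Int) × String)) :
    ∀ (seen : List (Int × Int)) (p : Int × Int × String), p ∈ pvDedupNew l seen →
      ∃ q, l.find? (fun q => q.1 == pvKeyOf p) = some q ∧ q.2 = p.2.2 := by
  induction l with
  | nil => intro seen p hp; simp [pvDedupNew] at hp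
  | cons q t ih =>
    intro seen p hp
    simp only [pvDedupNew] at hp
    by_cases h : q.1 ∈ seen
    · rw [if_pos h] at hp
      have hne : pvKeyOf p ≠ q.1 := by
        intro he
        have := (pv_dedupNew_mem_key t seen (pvKeyOf p)).mp (List.mem_map_of_mem hp)
        rw [he] at this
        exact this.2 h
      obtain ⟨r, hr, hv⟩ := ih seen p hp
      refine ⟨r, ?_, hv⟩
      rw [List.find?_cons_of_neg (by simpa using fun he => hne he.symm), hr]
    · rw [if_neg h] at hp
      rcases List.mem_cons.mp hp with rfl | hp
      · exact ⟨q, by rw [List.find?_cons_of_pos (by simp [pvKeyOf])], rfl⟩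
      · have hne : pvKeyOf p ≠ q.1 := by
          intro he
          have := (pv_dedupNew_mem_key t (seen ++ [q.1]) (pvKeyOf p)).mp (List.mem_map_of_mem hp)
          rw [he] at this
          exact this.2 (by simp)
        obtain ⟨r, hr, hv⟩ := ih _ p hp
        refine ⟨r, ?_, hv⟩
        rw [List.find?_cons_of_neg (by simpa using fun he => hne he.symm), hr]

-- ------- the sort characterised -------
def pvLexLt (a b : Int × Int × String) : Prop := a.1 < b.1 ∨ (a.1 = b.1 ∧ a.2.1 < b.2.1)

def pvBefore (a b : Int × Int × String) : Bool :=
  decide (a.1 < b.1) || (!decide (b.1 < a.1) && decide (a.2.1 < b.2.1))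

lemma pv_before_iff (a b : Int × Int × String) : pvBefore a b = true ↔ pvLexLt a b := by
  simp only [pvBefore, pvLexLt, Bool.or_eq_true, Bool.and_eq_true, Bool.not_eq_true',
    decide_eq_true_eq, decide_eq_false_iff_not]
  omega

lemma pv_sorted2_eq (xs : List (Int × Int × String)) :
    PySem.List.sorted2 xs (fun p => p.1) (fun p => p.2.1)
      = xs.foldl (fun acc x => PySem.List.insertBy pvBefore x acc) [] := rfl

lemma pv_before_asymm (a b : Int × Int × String) : pvBefore a b = true → pvBefore b a = false := by
  intro h
  rw [Bool.eq_false_iff]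
  intro h2
  rw [pv_before_iff] at h h2
  unfold pvLexLt at h h2
  omega

lemma pv_before_step (x y z : Int × Int × String) :
    pvBefore x y = true → pvBefore z y = false → pvBefore z x = false := by
  intro h1 h2
  rw [Bool.eq_false_iff]
  intro h3
  rw [pv_before_iff] at h1 h3
  rw [Bool.eq_false_iff] at h2
  have h2' : ¬ pvLexLt z y := fun hx => h2 ((pv_before_iff z y).mpr hx)
  unfold pvLexLt at h1 h2' h3
  omega

lemma pv_insertBy_pairwise (x : Int × Int × String) (ys : List (Int × Int × String))
    (h : ys.Pairwise (fun a b => pvBefore b a = false)) :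
    (PySem.List.insertBy pvBefore x ys).Pairwise (fun a b => pvBefore b a = false) := by
  induction ys with
  | nil => simp [PySem.List.insertBy]
  | cons y t ih =>
    rw [List.pairwise_cons] at h
    by_cases hb : pvBefore x y = true
    · rw [show PySem.List.insertBy pvBefore x (y :: t) = x :: y :: t from by
        simp [PySem.List.insertBy, hb]]
      rw [List.pairwise_cons]
      refine ⟨?_, List.pairwise_cons.mpr h⟩
      intro z hz
      rcases List.mem_cons.mp hz with rfl | hz
      · exact pv_before_asymm _ _ hb
      · exact pv_before_step x y z hb (h.1 z hz)
    · rw [show PySem.List.insertBy pvBefore x (y :: t) = y :: PySem.List.insertBy pvBefore x t from by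
        simp [PySem.List.insertBy, hb]]
      rw [List.pairwise_cons]
      refine ⟨?_, ih h.2⟩
      intro z hz
      rcases (PySem.List.mem_insertBy _ _ _ _).mp hz with rfl | hz
      · exact Bool.eq_false_iff.mpr hb
      · exact h.1 z hz

lemma pv_sorted2_pairwise (xs : List (Int × Int × String)) :
    (PySem.List.sorted2 xs (fun p => p.1) (fun p => p.2.1)).Pairwise
      (fun a b => pvBefore b a = false) := by
  rw [pv_sorted2_eq]
  have main : ∀ (l acc : List (Int × Int × String)),
      acc.Pairwise (fun a b => pvBefore b a = false) →
      (l.foldl (fun acc x => PySem.List.insertBy pvBefore x acc) acc).Pairwise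
        (fun a b => pvBefore b a = false) := by
    intro l
    induction l with
    | nil => intro acc h; exact h
    | cons x t ih =>
      intro acc h
      exact ih _ (pv_insertBy_pairwise x acc h)
  exact main xs [] List.Pairwise.nil

lemma pv_sorted2_pairwise_lt (xs : List (Int × Int × String))
    (hnd : (xs.map pvKeyOf).Nodup) :
    (PySem.List.sorted2 xs (fun p => p.1) (fun p => p.2.1)).Pairwise pvLexLt := by
  have hp := pv_sorted2_pairwise xs
  have hperm := PySem.List.sorted2_perm xs (fun p => p.1) (fun p => p.2.1) false
  have hnd2 : ((PySem.List.sorted2 xs (fun p => p.1) (fun p => p.2.1)).map pvKeyOf).Nodup :=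
    ((hperm.map pvKeyOf).nodup_iff).mpr hnd
  have hne := List.pairwise_map.mp hnd2
  refine (hne.and hp).imp ?_
  rintro a b ⟨hk, hb⟩
  rw [Bool.eq_false_iff] at hb
  have hb' : ¬ pvLexLt b a := fun hx => hb ((pv_before_iff b a).mpr hx)
  have hk' : ¬ (a.2.1 = b.2.1 ∧ a.1 = b.1) := by
    rintro ⟨h1, h2⟩
    exact hk (by unfold pvKeyOf; rw [h1, h2])
  unfold pvLexLt at hb' ⊢
  omega

-- ------- the sweep characterised -------
def pvLook (rc : List (Int × Int × String)) (u : Int) : String :=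
  ((rc.find? (fun p => p.2.1 == u)).map (fun p => p.2.2)).getD "."

lemma pv_map_const_range (a b : Int) :
    (PySem.List.pyRange a b 1).map (fun _ => (".":String)) = List.replicate (b - a).toNat "." := by
  rw [PySem.List.pyRange_one, List.map_map]
  have : ((fun _ => (".":String)) ∘ fun k : Nat => a + (k:Int)) = fun _ => (".":String) := rfl
  rw [this, List.map_const', List.length_range]

lemma pv_row (umax : Int) (rc : List (Int × Int × String)) :
    ∀ (cur : Int) (chars : List String),
      rc.Pairwise (fun a b => a.2.1 < b.2.1) →
      (∀ p ∈ rc, cur ≤ p.2.1 ∧ p.2.1 ≤ umax) →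
      (rc.foldl pvRowStep (chars, cur)).1
        ++ List.replicate (umax + 1 - (rc.foldl pvRowStep (chars, cur)).2).toNat "."
      = chars ++ (PySem.List.pyRange cur (umax + 1) 1).map (pvLook rc) := by
  induction rc with
  | nil =>
    intro cur chars _ _
    simp only [List.foldl_nil]
    have h0 : ∀ u ∈ PySem.List.pyRange cur (umax + 1) 1, pvLook [] u = "." := fun u _ => rfl
    rw [List.map_congr_left h0, pv_map_const_range]
  | cons p rc' ih =>
    intro cur chars hp hb
    rw [List.pairwise_cons] at hp
    obtain ⟨hcur, hum⟩ := hb p List.mem_cons_self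
    simp only [List.foldl_cons]
    rw [show pvRowStep (chars, cur) p
        = (chars ++ List.replicate (p.2.1 - cur).toNat "." ++ [p.2.2], p.2.1 + 1) from rfl]
    rw [ih (p.2.1 + 1) _ hp.2 (fun q hq => ⟨by have := hp.1 q hq; omega, (hb q (List.mem_cons_of_mem _ hq)).2⟩)]
    rw [PySem.List.pyRange_one_append cur p.2.1 (umax + 1) hcur (by omega),
        PySem.List.pyRange_one_cons (by omega : p.2.1 < umax + 1)]
    rw [List.map_append, List.map_cons]
    have hlook_lt : ∀ u ∈ PySem.List.pyRange cur p.2.1 1, pvLook (p :: rc') u = "." := by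
      intro u hu
      have hu' := (PySem.List.mem_pyRange_one).mp hu
      unfold pvLook
      rw [List.find?_eq_none.mpr ?_]
      · rfl
      · intro q hq
        rcases List.mem_cons.mp hq with rfl | hq
        · simp only [beq_iff_eq]; omega
        · have := hp.1 q hq; simp only [beq_iff_eq]; omega
    have hlook_self : pvLook (p :: rc') p.2.1 = p.2.2 := by
      unfold pvLook
      rw [List.find?_cons_of_pos (by simp)]
      rfl
    have hlook_gt : ∀ u ∈ PySem.List.pyRange (p.2.1 + 1) (umax + 1) 1,
        pvLook (p :: rc') u = pvLook rc' u := by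
      intro u hu
      have hu' := (PySem.List.mem_pyRange_one).mp hu
      unfold pvLook
      rw [List.find?_cons_of_neg (by simp only [beq_iff_eq]; omega)]
    rw [List.map_congr_left hlook_lt, pv_map_const_range, hlook_self,
        List.map_congr_left hlook_gt]
    simp [List.append_assoc]

lemma pv_span_prefix (v : Int) (rem : List (Int × Int × String)) :
    rem.Pairwise pvLexLt → (∀ p ∈ rem, v ≤ p.1) →
    rem.takeWhile (fun p => p.1 == v) = rem.filter (fun p => p.1 == v)
      ∧ (∀ p ∈ rem.dropWhile (fun p => p.1 == v), v + 1 ≤ p.1) := by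
  induction rem with
  | nil => intro _ _; simp
  | cons p t ih =>
    intro hp hg
    rw [List.pairwise_cons] at hp
    by_cases hv : p.1 = v
    · rw [List.takeWhile_cons_of_pos (by simp [hv]), List.filter_cons_of_pos (by simp [hv]),
          List.dropWhile_cons_of_pos (by simp [hv])]
      obtain ⟨h1, h2⟩ := ih hp.2 (fun q hq => hg q (List.mem_cons_of_mem _ hq))
      exact ⟨by rw [h1], h2⟩
    · have hvp : v + 1 ≤ p.1 := by have := hg p List.mem_cons_self; omega
      have hall : ∀ q ∈ t, v + 1 ≤ q.1 := by
        intro q hq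
        have := hp.1 q hq
        unfold pvLexLt at this
        omega
      rw [List.takeWhile_cons_of_neg (by simp [hv]), List.dropWhile_cons_of_neg (by simp [hv]),
          List.filter_cons_of_neg (by simp [hv])]
      refine ⟨?_, ?_⟩
      · rw [List.filter_eq_nil_iff.mpr (fun q hq => by have := hall q hq; simp only [beq_iff_eq]; omega)]
      · intro q hq
        rcases List.mem_cons.mp hq with rfl | hq
        · exact hvp
        · exact hall q hq

lemma pv_sweep (umin umax vmax : Int) :
    ∀ (n : Nat) (v : Int) (rem : List (Int × Int × String)) (lines : List String),
      (vmax + 1 - v).toNat = n →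
      rem.Pairwise pvLexLt →
      (∀ p ∈ rem, v ≤ p.1 ∧ p.1 ≤ vmax ∧ umin ≤ p.2.1 ∧ p.2.1 ≤ umax) →
      ((PySem.List.pyRange v (vmax + 1) 1).foldl (pvSweepStep umin umax) (rem, lines)).2
        = lines ++ (PySem.List.pyRange v (vmax + 1) 1).map (fun w =>
            PySem.Str.join " " ((PySem.List.pyRange umin (umax + 1) 1).map
              (pvLook (rem.filter (fun p => p.1 == w))))) := by
  intro n
  induction n with
  | zero =>
    intro v rem lines hn _ _
    rw [PySem.List.pyRange_one_eq_nil (by omega)]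
    simp
  | succ n ih =>
    intro v rem lines hn hp hb
    rw [PySem.List.pyRange_one_cons (by omega : v < vmax + 1)]
    simp only [List.foldl_cons, List.map_cons]
    obtain ⟨htw, hdw⟩ := pv_span_prefix v rem hp (fun p hp' => (hb p hp').1)
    have htw_pw : (rem.takeWhile (fun p => p.1 == v)).Pairwise (fun a b => a.2.1 < b.2.1) := by
      rw [htw]
      refine (hp.filter _).imp_of_mem ?_
      intro a b ha hb'
      have ha' := (List.mem_filter.mp ha).2
      have hb'' := (List.mem_filter.mp hb').2
      simp only [beq_iff_eq] at ha' hb''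
      intro hlt
      unfold pvLexLt at hlt
      omega
    have htw_bd : ∀ q ∈ rem.takeWhile (fun p => p.1 == v), umin ≤ q.2.1 ∧ q.2.1 ≤ umax := by
      intro q hq
      have := hb q ((List.takeWhile_sublist _).subset hq)
      exact ⟨this.2.2.1, this.2.2.2⟩
    have hstep : pvSweepStep umin umax (rem, lines) v
        = (rem.dropWhile (fun p => p.1 == v),
           lines ++ [PySem.Str.join " " ((PySem.List.pyRange umin (umax + 1) 1).map
             (pvLook (rem.filter (fun p => p.1 == v))))]) := by
      unfold pvSweepStep
      rw [List.span_eq_takeWhile_dropWhile]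
      have hr := pv_row umax (rem.takeWhile (fun p => p.1 == v)) umin [] htw_pw htw_bd
      rw [List.nil_append] at hr
      simp only []
      rw [hr, htw]
    rw [hstep]
    rw [ih (v + 1) _ _ (by omega) (List.Pairwise.sublist (List.dropWhile_sublist _) hp)
      (fun q hq => ⟨hdw q hq, (hb q ((List.dropWhile_sublist _).subset hq)).2.1,
        (hb q ((List.dropWhile_sublist _).subset hq)).2.2.1,
        (hb q ((List.dropWhile_sublist _).subset hq)).2.2.2⟩)]
    have hfilt : ∀ w ∈ PySem.List.pyRange (v + 1) (vmax + 1) 1,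
        (rem.dropWhile (fun p => p.1 == v)).filter (fun p => p.1 == w)
          = rem.filter (fun p => p.1 == w) := by
      intro w hw
      have hw' := (PySem.List.mem_pyRange_one).mp hw
      have hnil : (rem.takeWhile (fun p => p.1 == v)).filter (fun p => p.1 == w) = [] := by
        refine List.filter_eq_nil_iff.mpr ?_
        intro q hq
        have := List.mem_takeWhile_imp hq
        simp only [beq_iff_eq] at this ⊢
        omega
      conv_rhs => rw [← List.takeWhile_append_dropWhile (p := fun p => (p.1 == v)) (l := rem)]
      rw [List.filter_append, hnil, List.nil_append]
    have hmaps : List.map (fun w => PySem.Str.join " " (List.map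
          (pvLook ((rem.dropWhile (fun p => p.1 == v)).filter (fun p => p.1 == w)))
          (PySem.List.pyRange umin (umax + 1) 1))) (PySem.List.pyRange (v + 1) (vmax + 1) 1)
        = List.map (fun w => PySem.Str.join " " (List.map
          (pvLook (rem.filter (fun p => p.1 == w)))
          (PySem.List.pyRange umin (umax + 1) 1))) (PySem.List.pyRange (v + 1) (vmax + 1) 1) :=
      List.map_congr_left (fun w hw => by rw [hfilt w hw])
    rw [hmaps]
    simp

lemma pv_min_eq (xs ys : List Int) (h : ∀ x, x ∈ xs ↔ x ∈ ys) :
    PySem.List.min? xs (fun x => x) = PySem.List.min? ys (fun x => x) := by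
  cases hx : PySem.List.min? xs (fun x => x) with
  | none =>
    rw [PySem.List.min?_eq_none_iff] at hx
    cases hy : PySem.List.min? ys (fun x => x) with
    | none => rfl
    | some m =>
      exact absurd ((h m).mpr (PySem.List.min?_mem hy)) (by simp [hx])
  | some m =>
    cases hy : PySem.List.min? ys (fun x => x) with
    | none =>
      rw [PySem.List.min?_eq_none_iff] at hy
      exact absurd ((h m).mp (PySem.List.min?_mem hx)) (by simp [hy])
    | some m' =>
      have h1 := PySem.List.min?_isMin hx m' ((h m').mpr (PySem.List.min?_mem hy))
      have h2 := PySem.List.min?_isMin hy m ((h m).mp (PySem.List.min?_mem hx))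
      simp at h1 h2 ⊢
      omega

lemma pv_max_eq (xs ys : List Int) (h : ∀ x, x ∈ xs ↔ x ∈ ys) :
    PySem.List.max? xs (fun x => x) = PySem.List.max? ys (fun x => x) := by
  cases hx : PySem.List.max? xs (fun x => x) with
  | none =>
    rw [PySem.List.max?_eq_none_iff] at hx
    cases hy : PySem.List.max? ys (fun x => x) with
    | none => rfl
    | some m =>
      exact absurd ((h m).mpr (PySem.List.max?_mem hy)) (by simp [hx])
  | some m =>
    cases hy : PySem.List.max? ys (fun x => x) with
    | none =>
      rw [PySem.List.max?_eq_none_iff] at hy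
      exact absurd ((h m).mp (PySem.List.max?_mem hx)) (by simp [hy])
    | some m' =>
      have h1 := PySem.List.max?_isMax hx m' ((h m').mpr (PySem.List.max?_mem hy))
      have h2 := PySem.List.max?_isMax hy m ((h m).mp (PySem.List.max?_mem hx))
      simp at h1 h2 ⊢
      omega

lemma pv_pairwise_getLast :
    ∀ (l : List (Int × Int × String)), l.Pairwise pvLexLt →
      ∀ (z : Int × Int × String), l.getLast? = some z → ∀ p ∈ l, p.1 ≤ z.1 := by
  intro l
  induction l with
  | nil => intro _ z hz; simp at hz
  | cons a t ih =>
    intro hp z hz p hmem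
    rw [List.pairwise_cons] at hp
    cases ht : t with
    | nil =>
      subst ht
      simp at hz hmem
      subst hz; subst hmem; rfl
    | cons b t' =>
      rw [show (a :: t).getLast? = t.getLast? from by rw [ht]; rfl] at hz
      rcases List.mem_cons.mp hmem with rfl | hmem'
      · have hzmem : z ∈ t := List.mem_of_getLast? hz
        have := hp.1 z hzmem
        unfold pvLexLt at this
        omega
      · exact ih hp.2 z hz p hmem'

-- the central pointwise fact: A's dict probe equals B's lookup in the deduped sorted row
lemma pv_cell_eq (cells : List ((Int × Int) × String)) (v u : Int) :
    (cells.foldl pvStepD PySem.Dict.empty).getD (u, v) "."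
      = pvLook ((PySem.List.sorted2 (pvDedupNew cells.reverse [])
          (fun p => p.1) (fun p => p.2.1)).filter (fun p => p.1 == v)) u := by
  have hperm := PySem.List.sorted2_perm (pvDedupNew cells.reverse [])
    (fun p => p.1) (fun p => p.2.1) false
  rw [pv_getD_fold, PySem.Dict.getD_empty]
  unfold pvLook
  cases hf : (((PySem.List.sorted2 (pvDedupNew cells.reverse [])
      (fun p => p.1) (fun p => p.2.1)).filter (fun p => p.1 == v)).find? (fun p => p.2.1 == u)) with
  | some p =>
    have hpmem := List.mem_of_find?_eq_some hf
    have hpu : p.2.1 = u := by simpa using List.find?_some hf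
    have hpv : p.1 = v := by simpa using (List.mem_filter.mp hpmem).2
    have hp0 : p ∈ pvDedupNew cells.reverse [] :=
      hperm.mem_iff.mp (List.mem_filter.mp hpmem).1
    obtain ⟨r, hr, hv⟩ := pv_dedupNew_find cells.reverse [] p hp0
    have hkey : pvKeyOf p = (u, v) := by unfold pvKeyOf; rw [hpu, hpv]
    rw [hkey] at hr
    unfold pvLast
    rw [hr]
    simp [hv]
  | none =>
    have hnone : ∀ q ∈ cells.reverse, ¬ (q.1 == (u, v)) = true := by
      intro q hq hbeq
      have hqk : q.1 = (u, v) := by simpa using hbeq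
      have hmemk : (u, v) ∈ (pvDedupNew cells.reverse []).map pvKeyOf := by
        rw [pv_dedupNew_mem_key]
        exact ⟨by rw [← hqk]; exact List.mem_map_of_mem hq, by simp⟩
      obtain ⟨p, hpmem, hpk⟩ := List.mem_map.mp hmemk
      have hpu : p.2.1 = u := by unfold pvKeyOf at hpk; exact congrArg Prod.fst hpk
      have hpv : p.1 = v := by unfold pvKeyOf at hpk; exact congrArg (fun x => x.2) hpk
      have hpin : p ∈ (PySem.List.sorted2 (pvDedupNew cells.reverse [])
          (fun p => p.1) (fun p => p.2.1)).filter (fun p => p.1 == v) :=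
        List.mem_filter.mpr ⟨hperm.mem_iff.mpr hpmem, by simp [hpv]⟩
      have := List.find?_eq_none.mp hf p hpin
      simp [hpu] at this
    unfold pvLast
    rw [List.find?_eq_none.mpr hnone]
    rfl

-- the whole equivalence, for an arbitrary projected cell list
lemma pv_main (cells : List ((Int × Int) × String)) (view : String) :
    pvRenderGather (cells.foldl pvStepD PySem.Dict.empty) view = pvRenderSweep cells view := by
  cases cells with
  | nil => rfl
  | cons q rest =>
    have hperm := PySem.List.sorted2_perm (pvDedupNew (q :: rest).reverse [])
      (fun p => p.1) (fun p => p.2.1) false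
    set pts0 := pvDedupNew (q :: rest).reverse [] with hpts0
    set pts := PySem.List.sorted2 pts0 (fun p => p.1) (fun p => p.2.1) with hptsdef
    set mp := (q :: rest).foldl pvStepD PySem.Dict.empty with hmp
    -- dedup fold reduces to pvDedupNew
    have hded : ((q :: rest).reverse.foldl pvDedupStep (PySem.Set.empty, [])).2 = pts0 := by
      rw [pv_dedup_fold]; rfl
    -- key sets agree
    have hknd : (pts0.map pvKeyOf).Nodup := pv_dedupNew_nodup _ []
    have hpts_pw : pts.Pairwise pvLexLt := pv_sorted2_pairwise_lt pts0 hknd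
    have hkey_mem : ∀ k, k ∈ pts.map pvKeyOf ↔ k ∈ (q :: rest).map (fun c => c.1) := by
      intro k
      rw [(hperm.map pvKeyOf).mem_iff, hpts0, pv_dedupNew_mem_key]
      simp
      tauto
    have hmpkeys : ∀ k, k ∈ mp.keys ↔ k ∈ (q :: rest).map (fun c => c.1) := by
      intro k
      rw [hmp, pv_mem_keys]
      simp [PySem.Dict.keys_empty]
    -- pts is nonempty
    have hpts0_ne : pts0 ≠ [] := by
      rw [hpts0]
      obtain ⟨a, t, hrev⟩ : ∃ a t, (q :: rest).reverse = a :: t := by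
        cases h : (q :: rest).reverse with
        | nil => exact absurd h (by simp)
        | cons a t => exact ⟨a, t, rfl⟩
      rw [hrev]
      simp [pvDedupNew]
    have hpts_ne : pts ≠ [] := by
      intro h
      apply hpts0_ne
      have hl := hperm.length_eq
      rw [h] at hl
      exact List.length_eq_zero_iff.mp hl.symm
    obtain ⟨p0, ptl, hcons⟩ : ∃ p0 ptl, pts = p0 :: ptl := by
      cases h : pts with
      | nil => exact absurd h hpts_ne
      | cons a t => exact ⟨a, t, rfl⟩
    obtain ⟨z, hz⟩ : ∃ z, pts.getLast? = some z := by
      rw [hcons]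
      exact ⟨(p0 :: ptl).getLast (by simp), List.getLast?_eq_some_getLast (by simp)⟩
    have hzmem : z ∈ pts := List.mem_of_getLast? hz
    -- u extrema exist
    obtain ⟨mu, hmu⟩ : ∃ m, PySem.List.min? (pts.map (fun p => p.2.1)) (fun x => x) = some m := by
      cases h : PySem.List.min? (pts.map (fun p => p.2.1)) (fun x => x) with
      | none => rw [PySem.List.min?_eq_none_iff] at h; rw [hcons] at h; simp at h
      | some m => exact ⟨m, rfl⟩
    obtain ⟨bu, hbu⟩ : ∃ m, PySem.List.max? (pts.map (fun p => p.2.1)) (fun x => x) = some m := by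
      cases h : PySem.List.max? (pts.map (fun p => p.2.1)) (fun x => x) with
      | none => rw [PySem.List.max?_eq_none_iff] at h; rw [hcons] at h; simp at h
      | some m => exact ⟨m, rfl⟩
    -- v extrema are the first and last point of the sort
    have hhead_le : ∀ p ∈ pts, p0.1 ≤ p.1 := by
      intro p hp
      rw [hcons] at hp hpts_pw
      rcases List.mem_cons.mp hp with rfl | hp'
      · exact le_refl p.1
      · have := (List.pairwise_cons.mp hpts_pw).1 p hp'
        unfold pvLexLt at this
        omega
    have hvmin : PySem.List.min? (pts.map (fun p => p.1)) (fun x => x) = some p0.1 := by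
      cases h : PySem.List.min? (pts.map (fun p => p.1)) (fun x => x) with
      | none => rw [PySem.List.min?_eq_none_iff] at h; rw [hcons] at h; simp at h
      | some m =>
        obtain ⟨pm, hpm, hpm1⟩ := List.mem_map.mp (PySem.List.min?_mem h)
        have h1 : p0.1 ≤ m := hpm1 ▸ hhead_le pm hpm
        have h2 : m ≤ p0.1 := by
          have := PySem.List.min?_isMin h p0.1
            (List.mem_map_of_mem (hcons ▸ List.mem_cons_self))
          simpa using this
        rw [show m = p0.1 from le_antisymm h2 h1]
    have hlast_ge : ∀ p ∈ pts, p.1 ≤ z.1 := pv_pairwise_getLast pts hpts_pw z hz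
    have hvmax : PySem.List.max? (pts.map (fun p => p.1)) (fun x => x) = some z.1 := by
      cases h : PySem.List.max? (pts.map (fun p => p.1)) (fun x => x) with
      | none => rw [PySem.List.max?_eq_none_iff] at h; rw [hcons] at h; simp at h
      | some m =>
        obtain ⟨pm, hpm, hpm1⟩ := List.mem_map.mp (PySem.List.max?_mem h)
        have h1 : m ≤ z.1 := hpm1 ▸ hlast_ge pm hpm
        have h2 : z.1 ≤ m := by
          have := PySem.List.max?_isMax h z.1 (List.mem_map_of_mem hzmem)
          simpa using this
        rw [show m = z.1 from le_antisymm h1 h2]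
    -- A's extremum lists agree with B's
    have hus : ∀ x : Int, x ∈ mp.keys.map (fun uv => uv.1) ↔ x ∈ pts.map (fun p => p.2.1) := by
      intro x
      constructor
      · rintro hx
        obtain ⟨k, hk, rfl⟩ := List.mem_map.mp hx
        obtain ⟨p, hp, rfl⟩ := List.mem_map.mp ((hkey_mem k).mpr ((hmpkeys k).mp hk))
        exact List.mem_map_of_mem hp
      · rintro hx
        obtain ⟨p, hp, rfl⟩ := List.mem_map.mp hx
        have : pvKeyOf p ∈ mp.keys := (hmpkeys _).mpr ((hkey_mem _).mp (List.mem_map_of_mem hp))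
        exact List.mem_map.mpr ⟨pvKeyOf p, this, rfl⟩
    have hvs : ∀ x : Int, x ∈ mp.keys.map (fun uv => uv.2) ↔ x ∈ pts.map (fun p => p.1) := by
      intro x
      constructor
      · rintro hx
        obtain ⟨k, hk, rfl⟩ := List.mem_map.mp hx
        obtain ⟨p, hp, rfl⟩ := List.mem_map.mp ((hkey_mem k).mpr ((hmpkeys k).mp hk))
        exact List.mem_map_of_mem hp
      · rintro hx
        obtain ⟨p, hp, rfl⟩ := List.mem_map.mp hx
        have : pvKeyOf p ∈ mp.keys := (hmpkeys _).mpr ((hkey_mem _).mp (List.mem_map_of_mem hp))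
        exact List.mem_map.mpr ⟨pvKeyOf p, this, rfl⟩
    have huminA : PySem.List.min? (mp.keys.map (fun uv => uv.1)) (fun x => x) = some mu := by
      rw [pv_min_eq _ _ hus, hmu]
    have humaxA : PySem.List.max? (mp.keys.map (fun uv => uv.1)) (fun x => x) = some bu := by
      rw [pv_max_eq _ _ hus, hbu]
    have hvminA : PySem.List.min? (mp.keys.map (fun uv => uv.2)) (fun x => x) = some p0.1 := by
      rw [pv_min_eq _ _ hvs, hvmin]
    have hvmaxA : PySem.List.max? (mp.keys.map (fun uv => uv.2)) (fun x => x) = some z.1 := by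
      rw [pv_max_eq _ _ hvs, hvmax]
    -- bounds of every point
    have hbd : ∀ p ∈ pts, p0.1 ≤ p.1 ∧ p.1 ≤ z.1 ∧ mu ≤ p.2.1 ∧ p.2.1 ≤ bu := by
      intro p hp
      refine ⟨hhead_le p hp, hlast_ge p hp, ?_, ?_⟩
      · simpa using PySem.List.min?_isMin hmu p.2.1 (List.mem_map_of_mem hp)
      · simpa using PySem.List.max?_isMax hbu p.2.1 (List.mem_map_of_mem hp)
    -- guards
    have hAg : ¬ (mp.items.isEmpty = true) := by
      rw [List.isEmpty_iff]
      exact pv_items_ne_nil q rest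
    have hBg : ¬ ((q :: rest).isEmpty = true) := by simp
    -- unfold both renderers
    unfold pvRenderGather pvRenderSweep
    rw [if_neg hAg, if_neg hBg]
    simp only [hded, ← hptsdef, huminA, humaxA, hvminA, hvmaxA, hmu, hbu, Option.getD_some]
    rw [hcons, PySem.List.pyGet?_zero_cons, ← hcons, PySem.List.pyGet?_neg_one, hz]
    simp only [Option.map_some, Option.getD_some]
    -- B's sweep is the row-by-row gather
    rw [pv_sweep mu bu z.1 (z.1 + 1 - p0.1).toNat p0.1 pts _ rfl hpts_pw hbd]
    -- A's appending loops are maps; cells agree pointwise by pv_cell_eq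
    simp only [PySem.List.foldl_append_singleton_eq_map, List.nil_append]
    congr 1
    congr 1
    apply List.map_congr_left
    intro v _
    congr 1
    apply List.map_congr_left
    intro u _
    exact pv_cell_eq (q :: rest) v u

-- ===== VERDICT (by name: the statement is the Claim_ definition above) =====
theorem render_print_layout_spec : Claim_equal_render_print_layout := by
  intro pcs mode sq _
  unfold Spec_render_print_layout render_print_layout render_print_layout_alt
  rw [pv_buildMap_eq, pv_main]
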